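-- pv_equiv track=rewrite | github.com/AnasBuhayh/movie-genie | movie_genie/retrieval/two_tower_model.py | _create_ground_truth_mapping
-- ===== SOURCE A (Python) =====
-- from typing import Dict, List, Tuple, Optional, Any
--
-- def _create_ground_truth_mapping(positive_examples: List[Dict]) -> Dict[int, List[int]]:
--     """Create mapping from users to movies they actually liked in test set."""
--     user_ground_truth = {}
--     for example in positive_examples:
--         user_idx = example['user_idx']
--         movie_idx = example['movie_idx']
--
--         if user_idx not in user_ground_truth:
--             user_ground_truth[user_idx] = []
--         user_ground_truth[user_idx].append(movie_idx)
--
--     return user_ground_truth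
-- ===== SOURCE B (Python) =====
-- def _create_ground_truth_mapping(positive_examples):
--     """Create mapping from users to movies they actually liked in test set."""
--     pairs = [(ex['user_idx'], ex['movie_idx']) for ex in positive_examples]
--     return {u: [m for uu, m in pairs if uu == u]
--             for u in dict.fromkeys(u for u, _ in pairs)}
-- ===== Notes on version B (the rewrite author's own statement) =====
-- stated objective: alternative
-- what changed: A builds the dict incrementally (membership test, insert-empty, append) in one pass; B extracts the (user, movie) pairs, deduplicates the users in first-occurrence order, and builds the result as a dict comprehension whose values are filter-comprehensions over the pairs.
import Mathlib
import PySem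

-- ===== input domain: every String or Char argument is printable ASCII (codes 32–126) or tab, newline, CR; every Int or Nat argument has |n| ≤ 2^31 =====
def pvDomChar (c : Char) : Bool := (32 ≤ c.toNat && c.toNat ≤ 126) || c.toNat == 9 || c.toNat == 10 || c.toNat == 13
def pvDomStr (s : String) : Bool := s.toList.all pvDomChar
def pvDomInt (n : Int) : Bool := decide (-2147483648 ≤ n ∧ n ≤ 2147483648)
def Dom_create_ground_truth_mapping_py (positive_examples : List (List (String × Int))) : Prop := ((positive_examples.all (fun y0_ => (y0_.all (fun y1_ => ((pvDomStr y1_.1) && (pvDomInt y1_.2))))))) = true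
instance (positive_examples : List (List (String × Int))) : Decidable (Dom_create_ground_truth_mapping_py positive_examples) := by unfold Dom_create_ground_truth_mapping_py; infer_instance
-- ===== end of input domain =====

-- B groups via a dict comprehension over the first-occurrence-deduplicated users; return-value equivalence only.

-- ===== PORT A =====
-- example['key'] on the dict-as-assoc-list: first match; total form used under Pre_ (key present)
def pvKeyGet (ex : List (String × Int)) (k : String) : Int :=
  (PySem.Dict.mk ex).getD k 0

def create_ground_truth_mapping_py (positive_examples : List (List (String × Int))) : List (Int × List Int) :=
  (positive_examples.foldl (fun d ex =>
      let u := pvKeyGet ex "user_idx"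
      let m := pvKeyGet ex "movie_idx"
      let d' := if d.contains u then d else d.insert u ([] : List Int)
      d'.modify u [] (fun l => l ++ [m]))
    PySem.Dict.empty).items

-- ===== PORT B =====
def create_ground_truth_mapping_py_alt (positive_examples : List (List (String × Int))) : List (Int × List Int) :=
  let pairs := positive_examples.map (fun ex => (pvKeyGet ex "user_idx", pvKeyGet ex "movie_idx"))
  (PySem.List.dedup (pairs.map Prod.fst)).map
    (fun u => (u, (pairs.filter (fun p => p.1 == u)).map Prod.snd))

-- ===== PRECONDITION & SPEC =====
-- Pre_ excludes exactly the examples missing a 'user_idx' or 'movie_idx' key, on which A raises KeyError.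
def Pre_create_ground_truth_mapping_py (positive_examples : List (List (String × Int))) : Prop :=
  ∀ ex ∈ positive_examples, "user_idx" ∈ ex.map Prod.fst ∧ "movie_idx" ∈ ex.map Prod.fst
instance (positive_examples : List (List (String × Int))) : Decidable (Pre_create_ground_truth_mapping_py positive_examples) := by unfold Pre_create_ground_truth_mapping_py; infer_instance

def pvWitness_create_ground_truth_mapping_py : (List (List (String × Int))) :=
  [[("user_idx", 1), ("movie_idx", 7)], [("user_idx", 1), ("movie_idx", 9)], [("user_idx", 2), ("movie_idx", 7)]]

def Spec_create_ground_truth_mapping_py (positive_examples : List (List (String × Int))) (out : List (Int × List Int)) : Prop := out = create_ground_truth_mapping_py_alt positive_examples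
instance (positive_examples : List (List (String × Int))) (out : List (Int × List Int)) : Decidable (Spec_create_ground_truth_mapping_py positive_examples out) := by unfold Spec_create_ground_truth_mapping_py; infer_instance

-- ===== CLAIM (what is proved, stated in full; the proofs are below) =====
def Claim_equal_create_ground_truth_mapping_py : Prop := ∀ (positive_examples : List (List (String × Int))), Dom_create_ground_truth_mapping_py positive_examples → Pre_create_ground_truth_mapping_py positive_examples → Spec_create_ground_truth_mapping_py positive_examples (create_ground_truth_mapping_py positive_examples)

-- ===== LEMMAS AND PROOFS =====

-- A's "if absent insert []; then append" step is one Dict.modify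
theorem pv_step_eq (d : PySem.Dict Int (List Int)) (u m : Int) :
    (if d.contains u then d else d.insert u ([] : List Int)).modify u [] (fun l => l ++ [m])
      = d.modify u [] (fun l => l ++ [m]) := by
  by_cases h : d.contains u = true
  · simp [h]
  · have h' : d.contains u = false := by simpa using h
    simp [PySem.Dict.modify, PySem.Dict.insert_insert_self, PySem.Dict.getD_insert_self,
      PySem.Dict.getD_of_not_contains, h']

theorem pv_foldA (pairs : List (Int × Int)) :
    (pairs.foldl (fun d p => d.modify p.1 [] (fun l => l ++ [p.2])) (PySem.Dict.empty : PySem.Dict Int (List Int))).items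
      = (PySem.List.dedup (pairs.map Prod.fst)).map
          (fun u => (u, (pairs.filter (fun p => p.1 == u)).map Prod.snd)) := by
  have hnd : (pairs.foldl (fun d p => d.modify p.1 [] (fun l => l ++ [p.2]))
      (PySem.Dict.empty : PySem.Dict Int (List Int))).keys.Nodup :=
    PySem.Dict.nodup_keys_foldl_modify_key pairs Prod.fst [] (fun _ p => (fun l => l ++ [p.2])) _
      PySem.Dict.nodup_keys_empty
  rw [PySem.Dict.items_eq_map_keys _ hnd []]
  rw [PySem.Dict.keys_foldl_modify_key]
  rw [PySem.Dict.keys_empty, PySem.Set.update_nil_left]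
  rw [PySem.List.dedup_eq_ofList]
  apply List.map_congr_left
  intro u _
  rw [PySem.Dict.getD_foldl_modify_append, PySem.Dict.getD_empty]
  simp

-- ===== VERDICT (by name: the statement is the Claim_ definition above) =====
theorem create_ground_truth_mapping_py_spec : Claim_equal_create_ground_truth_mapping_py := by
  intro pes _ _
  unfold Spec_create_ground_truth_mapping_py create_ground_truth_mapping_py create_ground_truth_mapping_py_alt
  simp only [pv_step_eq]
  have h := pv_foldA (pes.map (fun ex => (pvKeyGet ex "user_idx", pvKeyGet ex "movie_idx")))
  rw [List.foldl_map] at h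
  exact h
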